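-- pv_equiv track=rewrite | github.com/twezo1337/optimal-processing-sequence | method_functions.py | rec1_sokol
-- ===== SOURCE A (Python) =====
-- import copy
--
-- def rec1_sokol(matr):
--     r = []
--     sum = []
--
--     for i in range(len(matr[0])):
--         temp_sum = 0
--         for j in range(len(matr) - 1):
--             temp_sum += matr[j][i]
--         sum.append(temp_sum)
--
--     sumcopy = copy.deepcopy(sum)
--     sumcopy.sort()
--
--     for i in sumcopy:
--         for j in range(len(sum)):
--             if i == sum[j]:
--                 r.append(j)
--
--     r = list(dict.fromkeys(r))
--
--     return r
-- ===== SOURCE B (Python) =====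
-- def rec1_sokol(matr):
--     n = len(matr[0])
--     sums = [sum(matr[j][i] for j in range(len(matr) - 1)) for i in range(n)]
--     return sorted(range(len(sums)), key=lambda j: sums[j])
-- ===== Notes on version B (the rewrite author's own statement) =====
-- stated objective: alternative
-- what changed: A sorts a copy of the column sums, then for each sorted value rescans all columns appending matching indices and finally dedups with dict.fromkeys; B computes the same column sums and returns sorted(range(n), key=sums.__getitem__), one stable key-sort of the indices with no rescans and no dedup.
import Mathlib
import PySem

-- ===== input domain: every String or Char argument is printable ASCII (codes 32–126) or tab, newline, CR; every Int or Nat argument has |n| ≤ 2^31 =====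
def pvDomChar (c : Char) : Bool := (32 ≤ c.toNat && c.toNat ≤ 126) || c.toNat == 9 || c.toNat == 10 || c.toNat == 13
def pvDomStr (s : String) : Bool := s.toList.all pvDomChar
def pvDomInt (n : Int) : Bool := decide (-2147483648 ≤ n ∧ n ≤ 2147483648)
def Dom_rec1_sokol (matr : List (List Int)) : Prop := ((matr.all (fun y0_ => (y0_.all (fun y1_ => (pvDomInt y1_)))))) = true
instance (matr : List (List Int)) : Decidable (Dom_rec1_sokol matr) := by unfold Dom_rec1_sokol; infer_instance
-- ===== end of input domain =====

-- B replaces A's sorted-value rescan plus dict.fromkeys dedup by one stable key-sort of the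
-- column indices (sorted(range(n), key=sums.__getitem__)); same column sums, same return value.

-- ===== PORT A =====
def rec1_sokol (matr : List (List Int)) : List Int :=
  let s : List Int :=
    (PySem.List.pyRange 0 (PySem.List.len (PySem.List.pyGetD matr 0 [])) 1).foldl
      (fun acc i =>
        acc ++ [(PySem.List.pyRange 0 (PySem.List.len matr - 1) 1).foldl
          (fun t j => t + PySem.List.pyGetD (PySem.List.pyGetD matr j []) i 0) 0]) []
  let sumcopy := PySem.List.sorted s (fun x => x) false
  let r := sumcopy.foldl (fun r i =>
    (PySem.List.pyRange 0 (PySem.List.len s) 1).foldl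
      (fun r j => if i == PySem.List.pyGetD s j 0 then r ++ [j] else r) r) []
  PySem.List.dedup r

-- ===== PORT B =====
def rec1_sokol_alt (matr : List (List Int)) : List Int :=
  let n := PySem.List.len (PySem.List.pyGetD matr 0 [])
  let sums := (PySem.List.pyRange 0 n 1).map (fun i =>
    ((PySem.List.pyRange 0 (PySem.List.len matr - 1) 1).map
      (fun j => PySem.List.pyGetD (PySem.List.pyGetD matr j []) i 0)).sum)
  PySem.List.sorted (PySem.List.pyRange 0 (PySem.List.len sums) 1)
    (fun j => PySem.List.pyGetD sums j 0) false

-- ===== PRECONDITION & SPEC =====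
-- Pre_ excludes exactly the inputs on which Python A raises IndexError: the empty matrix
-- (matr[0]) and matrices whose first len(matr)-1 rows are shorter than row 0 (matr[j][i]).
def Pre_rec1_sokol (matr : List (List Int)) : Prop :=
  matr ≠ [] ∧ ∀ row ∈ matr.dropLast, matr.headI.length ≤ row.length
instance (matr : List (List Int)) : Decidable (Pre_rec1_sokol matr) := by
  unfold Pre_rec1_sokol; infer_instance
def pvWitness_rec1_sokol : List (List Int) := [[1, 2], [3, 4]]

def Spec_rec1_sokol (matr : List (List Int)) (out : List Int) : Prop := out = rec1_sokol_alt matr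
instance (matr : List (List Int)) (out : List Int) : Decidable (Spec_rec1_sokol matr out) := by
  unfold Spec_rec1_sokol; infer_instance

-- ===== CLAIM (what is proved, stated in full; the proofs are below) =====
def Claim_equal_rec1_sokol : Prop := ∀ (matr : List (List Int)), Dom_rec1_sokol matr → Pre_rec1_sokol matr → Spec_rec1_sokol matr (rec1_sokol matr)

-- ===== LEMMAS AND PROOFS =====

-- the key of column index j: its column sum, read from the sums list s
def pvKey (s : List Int) (j : Int) : Int := PySem.List.pyGetD s j 0

-- the (index-ascending) block of column indices whose sum is v
def pvBlock (s : List Int) (v : Int) : List Int :=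
  (PySem.List.pyRange 0 (PySem.List.len s) 1).filter (fun j => v == PySem.List.pyGetD s j 0)

-- strict lexicographic order on indices: by key, ties by index
def pvLex (s : List Int) (a b : Int) : Prop :=
  pvKey s a < pvKey s b ∨ (pvKey s a = pvKey s b ∧ a < b)

-- ---- generic facts about foldl Set.add (= dedup) ----

theorem pv_foldl_add_done (s bs : List Int) (h : ∀ b ∈ bs, b ∈ s) :
    List.foldl PySem.Set.add s bs = s := by
  induction bs generalizing s with
  | nil => rfl
  | cons b bs ih =>
    have hb : b ∈ s := h b (by simp)
    have : PySem.Set.add s b = s := by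
      simp [PySem.Set.add] at *
      simp [hb]
    simp only [List.foldl_cons, this]
    exact ih s (fun x hx => h x (by simp [hx]))

theorem pv_foldl_add_fresh (s bs : List Int) (hnd : bs.Nodup) (h : ∀ b ∈ bs, b ∉ s) :
    List.foldl PySem.Set.add s bs = s ++ bs := by
  induction bs generalizing s with
  | nil => simp
  | cons b bs ih =>
    have hb : b ∉ s := h b (by simp)
    have hadd : PySem.Set.add s b = s ++ [b] := by
      simp [PySem.Set.add]
      intro hc
      exact absurd hc hb
    simp only [List.foldl_cons, hadd]
    rw [ih (s ++ [b]) hnd.of_cons]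
    · simp
    · intro x hx
      simp only [List.mem_append, List.mem_singleton]
      rintro (hxs | rfl)
      · exact h x (by simp [hx]) hxs
      · exact (List.nodup_cons.mp hnd).1 hx

theorem pv_foldl_add_sublist (bs : List Int) :
    ∀ s : List Int, ∃ t, List.foldl PySem.Set.add s bs = s ++ t ∧ t.Sublist bs := by
  induction bs with
  | nil => intro s; exact ⟨[], by simp, List.Sublist.refl _⟩
  | cons b bs ih =>
    intro s
    by_cases hb : b ∈ s
    · have : PySem.Set.add s b = s := by
        simp [PySem.Set.add] at *
        simp [hb]
      obtain ⟨t, ht, hsub⟩ := ih s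
      exact ⟨t, by simp only [List.foldl_cons, this, ht], hsub.cons b⟩
    · have : PySem.Set.add s b = s ++ [b] := by
        simp [PySem.Set.add]
        intro hc; exact absurd hc hb
      obtain ⟨t, ht, hsub⟩ := ih (s ++ [b])
      exact ⟨b :: t, by simp only [List.foldl_cons, this, ht]; simp, hsub.cons₂ b⟩

theorem pv_dedup_sublist (xs : List Int) : (PySem.List.dedup xs).Sublist xs := by
  obtain ⟨t, ht, hsub⟩ := pv_foldl_add_sublist xs []
  simpa [PySem.List.dedup, PySem.Set.ofList, PySem.Set.empty, ht] using hsub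

-- dedup commutes with flatMap over pairwise-disjoint nodup blocks
theorem pv_dedup_flatMap (f : Int → List Int)
    (hdisj : ∀ v w x, x ∈ f v → x ∈ f w → v = w) (hnd : ∀ v, (f v).Nodup) :
    ∀ (vs us : List Int),
      List.foldl PySem.Set.add (us.flatMap f) (vs.flatMap f) =
        (List.foldl PySem.Set.add us vs).flatMap f := by
  intro vs
  induction vs with
  | nil => intro us; rfl
  | cons v vs ih =>
    intro us
    simp only [List.flatMap_cons, List.foldl_append, List.foldl_cons]
    by_cases hv : v ∈ us
    · have h1 : List.foldl PySem.Set.add (us.flatMap f) (f v) = us.flatMap f :=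
        pv_foldl_add_done _ _ (fun x hx => List.mem_flatMap.mpr ⟨v, hv, hx⟩)
      have h2 : PySem.Set.add us v = us := by
        simp [PySem.Set.add] at *
        simp [hv]
      rw [h1, h2, ih us]
    · have h1 : List.foldl PySem.Set.add (us.flatMap f) (f v) = (us ++ [v]).flatMap f := by
        rw [pv_foldl_add_fresh _ _ (hnd v)]
        · simp
        · intro x hx hmem
          obtain ⟨w, hw, hxw⟩ := List.mem_flatMap.mp hmem
          exact hv ((hdisj v w x hx hxw) ▸ hw)
      have h2 : PySem.Set.add us v = us ++ [v] := by
        simp [PySem.Set.add]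
        intro hc; exact absurd hc hv
      rw [h1, h2, ih (us ++ [v])]

-- ---- facts about pyRange 0 (len s) 1 and blocks ----

theorem pv_range_eq (s : List Int) :
    PySem.List.pyRange 0 (PySem.List.len s) 1 =
      (List.range s.length).map (fun k : Nat => (k : Int)) := by
  rw [PySem.List.len_eq]; exact PySem.List.pyRange_zero_natCast _

theorem pv_range_pairwise (s : List Int) :
    (PySem.List.pyRange 0 (PySem.List.len s) 1).Pairwise (· < ·) := by
  rw [pv_range_eq, List.pairwise_map]
  exact List.pairwise_lt_range.imp (fun h => by exact_mod_cast h)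

theorem pv_range_nodup (s : List Int) :
    (PySem.List.pyRange 0 (PySem.List.len s) 1).Nodup :=
  (pv_range_pairwise s).imp (fun h => by omega)

theorem pv_mem_block (s : List Int) (v x : Int) :
    x ∈ pvBlock s v ↔ (0 ≤ x ∧ x < PySem.List.len s ∧ pvKey s x = v) := by
  simp only [pvBlock, List.mem_filter, PySem.List.mem_pyRange_one, pvKey, beq_iff_eq]
  constructor
  · rintro ⟨⟨h0, h1⟩, h2⟩; exact ⟨h0, h1, h2.symm⟩
  · rintro ⟨h0, h1, h2⟩; exact ⟨⟨h0, h1⟩, h2.symm⟩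

theorem pv_block_pairwise (s : List Int) (v : Int) : (pvBlock s v).Pairwise (pvLex s) := by
  have h1 : (pvBlock s v).Pairwise (· < ·) := (pv_range_pairwise s).filter _
  refine h1.imp_of_mem ?_
  intro a b ha hb hab
  right
  exact ⟨((pv_mem_block s v a).mp ha).2.2.trans ((pv_mem_block s v b).mp hb).2.2.symm, hab⟩

theorem pv_block_nodup (s : List Int) (v : Int) : (pvBlock s v).Nodup :=
  (pv_range_nodup s).filter _

theorem pv_block_disj (s : List Int) (v w x : Int)
    (hv : x ∈ pvBlock s v) (hw : x ∈ pvBlock s w) : v = w :=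
  ((pv_mem_block s v x).mp hv).2.2.symm.trans ((pv_mem_block s w x).mp hw).2.2

-- ---- the canonical form: blocks of the strictly sorted distinct sums ----

theorem pv_canon_pairwise (s : List Int) :
    ((PySem.List.sorted (PySem.Set.ofList s) (fun x => x) false).flatMap
      (pvBlock s)).Pairwise (pvLex s) := by
  rw [List.pairwise_flatMap]
  constructor
  · intro v _; exact pv_block_pairwise s v
  · refine (PySem.List.sorted_ofList_pairwise_lt s).imp ?_
    intro v w hvw x hx y hy
    left
    rw [((pv_mem_block s v x).mp hx).2.2, ((pv_mem_block s w y).mp hy).2.2]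
    exact hvw

theorem pv_lex_nodup {s : List Int} {l : List Int}
    (h : l.Pairwise (pvLex s)) : l.Nodup :=
  h.imp (fun hab heq => by subst heq; rcases hab with h | ⟨_, h⟩ <;> omega)

theorem pv_canon_perm (s : List Int) :
    ((PySem.List.sorted (PySem.Set.ofList s) (fun x => x) false).flatMap
      (pvBlock s)).Perm (PySem.List.pyRange 0 (PySem.List.len s) 1) := by
  rw [List.perm_ext_iff_of_nodup (pv_lex_nodup (pv_canon_pairwise s)) (pv_range_nodup s)]
  intro x
  simp only [List.mem_flatMap, PySem.List.mem_sorted, PySem.Set.mem_ofList,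
    PySem.List.mem_pyRange_one]
  constructor
  · rintro ⟨v, _, hx⟩
    have := (pv_mem_block s v x).mp hx
    rw [PySem.List.len_eq] at this ⊢
    exact ⟨this.1, this.2.1⟩
  · rintro ⟨h0, h1⟩
    refine ⟨pvKey s x, ?_, (pv_mem_block s (pvKey s x) x).mpr ⟨h0, h1, rfl⟩⟩
    have hin : PySem.Raise.InRange s.length x := by
      rw [PySem.List.len_eq] at h1
      constructor <;> omega
    exact PySem.List.pyGetD_mem s 0 hin

-- ---- A's result equals the canonical form ----

theorem pv_dedup_sorted_eq (s : List Int) :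
    PySem.List.dedup (PySem.List.sorted s (fun x => x) false) =
      PySem.List.sorted (PySem.Set.ofList s) (fun x => x) false := by
  have hnd1 : (PySem.List.dedup (PySem.List.sorted s (fun x => x) false)).Nodup :=
    PySem.List.nodup_dedup _
  have hp1 : (PySem.List.dedup (PySem.List.sorted s (fun x => x) false)).Pairwise (· < ·) := by
    have hle : (PySem.List.dedup (PySem.List.sorted s (fun x => x) false)).Pairwise
        (fun a b => a ≤ b) :=
      List.Pairwise.sublist (pv_dedup_sublist _) (PySem.List.sorted_pairwise s (fun x => x))
    exact (hle.and hnd1).imp (fun h => lt_of_le_of_ne h.1 h.2)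
  have hp2 := PySem.List.sorted_ofList_pairwise_lt s
  refine List.Perm.eq_of_pairwise (fun a b _ _ hab hba => by omega) hp1 hp2 ?_
  rw [List.perm_ext_iff_of_nodup hnd1 (hp2.imp (fun h => ne_of_lt h))]
  intro x
  simp [PySem.List.mem_sorted, PySem.Set.mem_ofList]

theorem pv_A_eq_canon (s : List Int) :
    PySem.List.dedup ((PySem.List.sorted s (fun x => x) false).flatMap (pvBlock s)) =
      (PySem.List.sorted (PySem.Set.ofList s) (fun x => x) false).flatMap (pvBlock s) := by
  have h := pv_dedup_flatMap (pvBlock s) (pv_block_disj s) (pv_block_nodup s)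
    (PySem.List.sorted s (fun x => x) false) []
  simp only [List.flatMap_nil] at h
  calc PySem.List.dedup ((PySem.List.sorted s (fun x => x) false).flatMap (pvBlock s))
      = List.foldl PySem.Set.add [] ((PySem.List.sorted s (fun x => x) false).flatMap
          (pvBlock s)) := rfl
    _ = (List.foldl PySem.Set.add [] (PySem.List.sorted s (fun x => x) false)).flatMap
          (pvBlock s) := h
    _ = (PySem.List.dedup (PySem.List.sorted s (fun x => x) false)).flatMap (pvBlock s) := rfl
    _ = (PySem.List.sorted (PySem.Set.ofList s) (fun x => x) false).flatMap (pvBlock s) := by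
          rw [pv_dedup_sorted_eq]

-- ---- B's result equals the canonical form (stability of the insertion sort) ----

theorem pv_insertBy_pairwise (s : List Int) (x : Int) :
    ∀ ys : List Int, ys.Pairwise (pvLex s) → (∀ y ∈ ys, y < x) →
      (PySem.List.insertBy (fun a b => decide (pvKey s a < pvKey s b)) x ys).Pairwise
        (pvLex s) := by
  intro ys
  induction ys with
  | nil => intro _ _; simp [PySem.List.insertBy]
  | cons y ys ih =>
    intro hp hlt
    have heq : PySem.List.insertBy (fun a b => decide (pvKey s a < pvKey s b)) x (y :: ys) =
        if decide (pvKey s x < pvKey s y) then x :: y :: ys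
        else y :: PySem.List.insertBy (fun a b => decide (pvKey s a < pvKey s b)) x ys := by
      simp only [PySem.List.insertBy]
    rw [heq]
    by_cases hxy : pvKey s x < pvKey s y
    · simp only [hxy, decide_true, if_true]
      refine List.pairwise_cons.mpr ⟨?_, hp⟩
      intro z hz
      rcases List.mem_cons.mp hz with rfl | hz
      · exact Or.inl hxy
      · have : pvLex s y z := (List.pairwise_cons.mp hp).1 z hz
        left
        rcases this with h | ⟨h, _⟩ <;> omega
    · simp only [hxy, decide_false, Bool.false_eq_true, if_false]
      refine List.pairwise_cons.mpr ⟨?_, ih (List.pairwise_cons.mp hp).2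
        (fun a ha => hlt a (by simp [ha]))⟩
      intro z hz
      rcases (PySem.List.mem_insertBy _ x z ys).mp hz with rfl | hz
      · rcases lt_or_eq_of_le (not_lt.mp hxy) with h | h
        · exact Or.inl h
        · exact Or.inr ⟨h, hlt y (by simp)⟩
      · exact (List.pairwise_cons.mp hp).1 z hz

theorem pv_foldl_insert_pairwise (s : List Int) :
    ∀ (js acc : List Int), acc.Pairwise (pvLex s) → (∀ a ∈ acc, ∀ j ∈ js, a < j) →
      js.Pairwise (· < ·) →
      (js.foldl (fun acc x =>
        PySem.List.insertBy (fun a b => decide (pvKey s a < pvKey s b)) x acc) acc).Pairwise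
        (pvLex s) := by
  intro js
  induction js with
  | nil => intro acc h _ _; exact h
  | cons j js ih =>
    intro acc hp hlt hjs
    simp only [List.foldl_cons]
    refine ih _ (pv_insertBy_pairwise s j acc hp (fun a ha => hlt a ha j (by simp))) ?_
      hjs.of_cons
    intro a ha j' hj'
    rcases (PySem.List.mem_insertBy _ j a acc).mp ha with rfl | ha
    · exact (List.pairwise_cons.mp hjs).1 j' hj'
    · exact hlt a ha j' (by simp [hj'])

theorem pv_B_eq_canon (s : List Int) :
    PySem.List.sorted (PySem.List.pyRange 0 (PySem.List.len s) 1)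
      (fun j => PySem.List.pyGetD s j 0) false =
    (PySem.List.sorted (PySem.Set.ofList s) (fun x => x) false).flatMap (pvBlock s) := by
  have hpB : (PySem.List.sorted (PySem.List.pyRange 0 (PySem.List.len s) 1)
      (fun j => PySem.List.pyGetD s j 0) false).Pairwise (pvLex s) := by
    rw [PySem.List.sorted_eq_foldl_insertBy]
    exact pv_foldl_insert_pairwise s _ [] (by simp) (by simp) (pv_range_pairwise s)
  refine List.Perm.eq_of_pairwise
    (fun a b _ _ hab hba => by
      rcases hab with h | ⟨h, h'⟩ <;> rcases hba with g | ⟨g, g'⟩ <;> omega)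
    hpB (pv_canon_pairwise s) ?_
  exact (PySem.List.sorted_perm _ _ _).trans (pv_canon_perm s).symm

-- ---- the core identity over an arbitrary sums list ----

theorem pv_core (s : List Int) :
    PySem.List.dedup ((PySem.List.sorted s (fun x => x) false).flatMap (pvBlock s)) =
      PySem.List.sorted (PySem.List.pyRange 0 (PySem.List.len s) 1)
        (fun j => PySem.List.pyGetD s j 0) false := by
  rw [pv_A_eq_canon, pv_B_eq_canon]

-- ===== VERDICT (by name: the statement is the Claim_ definition above) =====
theorem rec1_sokol_spec : Claim_equal_rec1_sokol := by
  intro matr _ _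
  unfold Spec_rec1_sokol rec1_sokol rec1_sokol_alt
  simp only [PySem.List.foldl_append_singleton_eq_map, PySem.List.foldl_add,
    PySem.List.foldl_append_if, PySem.List.foldl_append_eq_flatMap, List.nil_append,
    zero_add, List.map_id_fun', id]
  have h := pv_core ((PySem.List.pyRange 0 (PySem.List.len (PySem.List.pyGetD matr 0 [])) 1).map
    (fun i => ((PySem.List.pyRange 0 (PySem.List.len matr - 1) 1).map
      (fun j => PySem.List.pyGetD (PySem.List.pyGetD matr j []) i 0)).sum))
  exact h
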